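-- pv_equiv track=rewrite | github.com/osoleve/fold-sft-data | sft_prompt_diversity.py | _split_top_level_forms
-- ===== SOURCE A (Python) =====
-- from typing import Dict, List, Sequence
--
-- def _split_top_level_forms(text: str) -> List[str]:
--     forms: List[str] = []
--     n = len(text)
--     i = 0
--     while i < n:
--         while i < n and text[i].isspace():
--             i += 1
--         if i >= n:
--             break
--         start = i
--         depth = 0
--         in_string = False
--         escape = False
--         while i < n:
--             ch = text[i]
--             if in_string:
--                 if escape:
--                     escape = False
--                 elif ch == "\\":
--                     escape = True
--                 elif ch == '"':
--                     in_string = False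
--                 i += 1
--                 continue
--
--             if ch == '"':
--                 in_string = True
--                 i += 1
--                 continue
--
--             if ch == ";":
--                 while i < n and text[i] != "\n":
--                     i += 1
--                 continue
--
--             if ch == "(":
--                 depth += 1
--                 i += 1
--                 continue
--
--             if ch == ")":
--                 if depth > 0:
--                     depth -= 1
--                     i += 1
--                     if depth == 0:
--                         while i < n and text[i].isspace():
--                             i += 1
--                         break
--                     continue
--                 break
--
--             if depth == 0 and ch.isspace():
--                 break
--
--             i += 1
--
--         form = text[start:i].strip()
--         if form:
--             forms.append(form)
--         while i < n and text[i].isspace():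
--             i += 1
--     return forms
-- ===== SOURCE B (Python) =====
-- from typing import List
--
-- # B: tokenize-then-group decomposition. One scan turns the text into tagged
-- # tokens (paren tokens, a quoted string, a semicolon-to-newline comment, a
-- # whitespace run, an atom run); a second pass over the tokens tracks paren
-- # depth and a buffer, emitting the stripped buffer at each top-level boundary.
--
-- _SPACE = " \t\n\r\x0b\x0c"
--
-- def _tokenize(text: str):
--     toks = []
--     i = 0
--     n = len(text)
--     while i < n:
--         ch = text[i]
--         if ch in _SPACE:
--             j = i
--             while j < n and text[j] in _SPACE:
--                 j += 1
--             toks.append(("ws", text[i:j]))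
--             i = j
--         elif ch == "(":
--             toks.append(("lp", "("))
--             i += 1
--         elif ch == ")":
--             toks.append(("rp", ")"))
--             i += 1
--         elif ch == '"':
--             j = i + 1
--             esc = False
--             while j < n:
--                 c = text[j]
--                 j += 1
--                 if esc:
--                     esc = False
--                 elif c == "\\":
--                     esc = True
--                 elif c == '"':
--                     break
--             toks.append(("str", text[i:j]))
--             i = j
--         elif ch == ";":
--             j = i
--             while j < n and text[j] != "\n":
--                 j += 1
--             toks.append(("com", text[i:j]))
--             i = j
--         else:
--             j = i
--             while j < n and text[j] not in _SPACE and text[j] not in '();"':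
--                 j += 1
--             toks.append(("atom", text[i:j]))
--             i = j
--     return toks
--
-- def _split_top_level_forms(text: str) -> List[str]:
--     forms: List[str] = []
--     depth = 0
--     buf = ""
--     in_form = False
--     for kind, tok in _tokenize(text):
--         if not in_form:
--             if kind == "ws" or kind == "rp":
--                 continue  # skip separators (and a stray top-level ')')
--             in_form = True
--             buf = tok
--             depth = 1 if kind == "lp" else 0
--             continue
--         if depth == 0 and (kind == "ws" or kind == "rp"):
--             form = buf.strip()
--             if form:
--                 forms.append(form)
--             in_form = False
--             continue
--         buf += tok
--         if kind == "lp":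
--             depth += 1
--         elif kind == "rp":
--             depth -= 1
--             if depth == 0:
--                 form = buf.strip()
--                 if form:
--                     forms.append(form)
--                 in_form = False
--     if in_form:
--         form = buf.strip()
--         if form:
--             forms.append(form)
--     return forms
-- ===== Notes on version B (the rewrite author's own statement) =====
-- stated objective: alternative
-- what changed: A's single nested dual-index while-loops over the raw string are replaced by a two-phase decomposition: one scan tokenizes the text into tagged runs (paren tokens, quoted strings, semicolon comments, whitespace runs, atom runs), then a second pass groups the tokens into top-level forms with a depth counter and a buffer.
-- outside the precondition, e.g. on _split_top_level_forms(')'): A does not finish within the time limit, B returns []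
import Mathlib
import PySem

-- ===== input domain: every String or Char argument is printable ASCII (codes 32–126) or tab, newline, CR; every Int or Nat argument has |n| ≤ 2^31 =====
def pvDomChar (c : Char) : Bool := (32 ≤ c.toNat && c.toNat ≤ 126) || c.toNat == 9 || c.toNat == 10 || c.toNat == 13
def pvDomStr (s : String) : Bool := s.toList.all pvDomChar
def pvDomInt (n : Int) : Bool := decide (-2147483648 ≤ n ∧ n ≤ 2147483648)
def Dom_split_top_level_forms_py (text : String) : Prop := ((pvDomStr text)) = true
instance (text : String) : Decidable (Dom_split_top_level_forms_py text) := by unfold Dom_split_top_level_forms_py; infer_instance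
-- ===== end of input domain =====

-- B re-implements the splitter as tokenize-then-group (one tagged-run scan, then a
-- depth/buffer pass over the tokens) instead of A's nested index loops; objective: alternative.

-- ===== PORT A =====
-- inner `while i < n` loop of A: returns (consumed chars, remaining chars)
def aInner (cs : List Char) (d : Nat) (inStr esc : Bool) : List Char × List Char :=
  match cs with
  | [] => ([], [])
  | c :: t =>
    if inStr then
      -- if escape: escape=False / elif '\\': escape=True / elif '"': in_string=False
      let st : Bool × Bool :=
        if esc then (true, false)
        else if c = '\\' then (true, true)
        else if c = '"' then (false, false)
        else (true, false)
      let r := aInner t d st.1 st.2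
      (c :: r.1, r.2)
    else if c = '"' then
      let r := aInner t d true false
      (c :: r.1, r.2)
    else if c = ';' then
      -- while i < n and text[i] != '\n': i += 1
      let r := aInner (t.dropWhile (· ≠ '\n')) d false false
      ((c :: t.takeWhile (· ≠ '\n')) ++ r.1, r.2)
    else if c = '(' then
      let r := aInner t (d + 1) false false
      (c :: r.1, r.2)
    else if c = ')' then
      if 0 < d then
        if d - 1 = 0 then
          -- depth hit 0: skip trailing whitespace (it stays in the slice), then break
          (c :: t.takeWhile PySem.Chars.isspace, t.dropWhile PySem.Chars.isspace)
        else
          let r := aInner t (d - 1) false false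
          (c :: r.1, r.2)
      else ([], c :: t)  -- stray ')' at depth 0: break without consuming
    else if d = 0 ∧ PySem.Chars.isspace c = true then ([], c :: t)
    else
      let r := aInner t d false false
      (c :: r.1, r.2)
termination_by cs.length
decreasing_by
  all_goals simp
  exact List.length_dropWhile_le _ _

def aSkipWS (cs : List Char) : List Char := cs.dropWhile PySem.Chars.isspace

-- outer `while i < n` loop of A (fuel only guards the stray-')' divergence, excluded by Pre_)
def aOuter (fuel : Nat) (rest : List Char) (acc : List (List Char)) : List (List Char) :=
  match fuel with
  | 0 => acc
  | f + 1 =>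
    let r1 := aSkipWS rest
    if r1.isEmpty then acc
    else
      let p := aInner r1 0 false false
      let form := PySem.Chars.strip p.1
      let acc' := if form.isEmpty then acc else acc ++ [form]
      aOuter f (aSkipWS p.2) acc'

def split_top_level_forms_py (text : String) : List String :=
  (aOuter (text.toList.length + 1) text.toList []).map String.ofList

-- ===== PORT B =====
inductive BTok where
  | lp | rp
  | str (s : List Char)
  | com (s : List Char)
  | ws (s : List Char)
  | atom (s : List Char)
deriving Repr, DecidableEq

def tokText : BTok → List Char
  | .lp => ['(']
  | .rp => [')']
  | .str s => s
  | .com s => s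
  | .ws s => s
  | .atom s => s

def isAtomChar (c : Char) : Bool :=
  !PySem.Chars.isspace c && !(c = '(' : Bool) && !(c = ')' : Bool) && !(c = '"' : Bool) && !(c = ';' : Bool)

-- body of a double-quoted string: consume up to and including the closing quote
def scanStr (t : List Char) (esc : Bool) : List Char × List Char :=
  match t with
  | [] => ([], [])
  | c :: t' =>
    if esc then let r := scanStr t' false; (c :: r.1, r.2)
    else if c = '\\' then let r := scanStr t' true; (c :: r.1, r.2)
    else if c = '"' then ([c], t')
    else let r := scanStr t' false; (c :: r.1, r.2)

theorem scanStr_rest_le (t : List Char) (esc : Bool) : (scanStr t esc).2.length ≤ t.length := by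
  induction t generalizing esc with
  | nil => simp [scanStr]
  | cons c t ih =>
    simp only [scanStr]
    split_ifs <;> simp <;> exact le_trans (ih _) (Nat.le_succ _)

def tokenize (cs : List Char) : List BTok :=
  match cs with
  | [] => []
  | c :: t =>
    if PySem.Chars.isspace c then
      .ws (c :: t.takeWhile PySem.Chars.isspace) :: tokenize (t.dropWhile PySem.Chars.isspace)
    else if c = '(' then .lp :: tokenize t
    else if c = ')' then .rp :: tokenize t
    else if c = '"' then
      let p := scanStr t false
      .str (c :: p.1) :: tokenize p.2
    else if c = ';' then
      .com (c :: t.takeWhile (· ≠ '\n')) :: tokenize (t.dropWhile (· ≠ '\n'))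
    else .atom (c :: t.takeWhile isAtomChar) :: tokenize (t.dropWhile isAtomChar)
termination_by cs.length
decreasing_by
  all_goals simp
  all_goals first
    | exact List.length_dropWhile_le _ _
    | exact scanStr_rest_le t false

def pushForm (buf : List Char) (rest : List (List Char)) : List (List Char) :=
  let f := PySem.Chars.strip buf
  if f.isEmpty then rest else f :: rest

-- the grouping pass: (inForm, depth, buffer) over the token list
def grp (ts : List BTok) (inForm : Bool) (d : Nat) (buf : List Char) : List (List Char) :=
  match ts with
  | [] => if inForm then pushForm buf [] else []
  | tok :: ts =>
    if inForm then
      if d = 0 then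
        match tok with
        | .ws _ => pushForm buf (grp ts false 0 [])
        | .rp => pushForm buf (grp ts false 0 [])
        | .lp => grp ts true 1 (buf ++ ['('])
        | t => grp ts true 0 (buf ++ tokText t)
      else
        match tok with
        | .lp => grp ts true (d + 1) (buf ++ ['('])
        | .rp =>
          if d - 1 = 0 then pushForm (buf ++ [')']) (grp ts false 0 [])
          else grp ts true (d - 1) (buf ++ [')'])
        | t => grp ts true d (buf ++ tokText t)
    else
      match tok with
      | .ws _ => grp ts false 0 []
      | .rp => grp ts false 0 []   -- stray top-level ')' skipped (outside Pre_)
      | .lp => grp ts true 1 ['(']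
      | t => grp ts true 0 (tokText t)

def split_top_level_forms_py_alt (text : String) : List String :=
  (grp (tokenize text.toList) false 0 []).map String.ofList

-- ===== PRECONDITION & SPEC =====
-- Parenthesis-balance state machine for Pre_: state = (mode, depth, ok) with
-- mode 0 = normal, 1 = in string, 2 = string escape, 3 = in ;-comment.
def pvBalStep (st : Nat × Nat × Bool) (c : Char) : Nat × Nat × Bool :=
  match st with
  | (m, d, ok) =>
    if m = 1 then (if c = '\\' then 2 else if c = '"' then 0 else 1, d, ok)
    else if m = 2 then (1, d, ok)
    else if m = 3 then (if c = '\n' then 0 else 3, d, ok)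
    else if c = '"' then (1, d, ok)
    else if c = ';' then (3, d, ok)
    else if c = '(' then (0, d + 1, ok)
    else if c = ')' then (0, d - 1, ok && decide (0 < d))
    else (0, d, ok)

-- Pre_ excludes exactly the texts containing an unmatched ')' at top level (outside
-- double-quoted strings and ;-comments): there A's outer loop makes no progress and
-- the Python A loops forever, returning nothing.
def Pre_split_top_level_forms_py (text : String) : Prop :=
  (text.toList.foldl pvBalStep (0, 0, true)).2.2 = true
instance (text : String) : Decidable (Pre_split_top_level_forms_py text) := by
  unfold Pre_split_top_level_forms_py; infer_instance
def pvWitness_split_top_level_forms_py : String := "(+ 1 2) foo ; c\n\"s\""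

def Spec_split_top_level_forms_py (text : String) (out : List String) : Prop := out = split_top_level_forms_py_alt text
instance (text : String) (out : List String) : Decidable (Spec_split_top_level_forms_py text out) := by unfold Spec_split_top_level_forms_py; infer_instance

-- ===== CLAIM (what is proved, stated in full; the proofs are below) =====
def Claim_equal_split_top_level_forms_py : Prop := ∀ (text : String), Dom_split_top_level_forms_py text → Pre_split_top_level_forms_py text → Spec_split_top_level_forms_py text (split_top_level_forms_py text)

-- ===== LEMMAS AND PROOFS =====

-- proof-side balance scan mirrored by Pre_'s foldl: skip a double-quoted string body (escapes honoured)
def balString (t : List Char) (esc : Bool) : List Char :=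
  match t with
  | [] => []
  | c :: t' =>
    if esc then balString t' false
    else if c = '\\' then balString t' true
    else if c = '"' then t'
    else balString t' false

theorem balString_le (t : List Char) (esc : Bool) : (balString t esc).length ≤ t.length := by
  induction t generalizing esc with
  | nil => simp [balString]
  | cons c t ih =>
    simp only [balString]
    split_ifs <;> first
      | (exact le_trans (ih _) (Nat.le_succ _))
      | simp

-- no unmatched ')' at top level (outside strings and ;-comments), scanning with depth d
def bal (cs : List Char) (d : Nat) : Bool :=
  match cs with
  | [] => true
  | c :: t =>
    if c = '"' then bal (balString t false) d
    else if c = ';' then bal (t.dropWhile (· ≠ '\n')) d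
    else if c = '(' then bal t (d + 1)
    else if c = ')' then decide (0 < d) && bal t (d - 1)
    else bal t d
termination_by cs.length
decreasing_by
  all_goals simp
  all_goals first
    | exact List.length_dropWhile_le _ _
    | exact balString_le t false

-- scanStr's tail is what bal's string skipper computes
theorem scanStr_snd_eq_balString (t : List Char) (esc : Bool) :
    (scanStr t esc).2 = balString t esc := by
  induction t generalizing esc with
  | nil => simp [scanStr, balString]
  | cons c t ih => simp only [scanStr, balString]; split_ifs <;> simp [ih]

-- A's inner loop in string state consumes exactly the scanStr run
theorem aInner_string (t : List Char) (d : Nat) (esc : Bool) :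
    aInner t d true esc =
      ((scanStr t esc).1 ++ (aInner (scanStr t esc).2 d false false).1,
       (aInner (scanStr t esc).2 d false false).2) := by
  induction t generalizing esc with
  | nil => simp [scanStr, aInner]
  | cons c t ih =>
    by_cases he : esc
    · simp [aInner, scanStr, he, ih]
    · by_cases hb : c = '\\'
      · simp [aInner, scanStr, he, hb, ih]
      · by_cases hq : c = '"'
        · simp [aInner, scanStr, he, hq]
        · simp [aInner, scanStr, he, hb, hq, ih]

theorem space_ne (c : Char) (hc : PySem.Chars.isspace c = true) :
    c ≠ '"' ∧ c ≠ ';' ∧ c ≠ '(' ∧ c ≠ ')' := by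
  refine ⟨?_, ?_, ?_, ?_⟩ <;> rintro rfl <;> exact absurd hc (by decide)

theorem bal_cons_space (c : Char) (t : List Char) (d : Nat) (hc : PySem.Chars.isspace c = true) :
    bal (c :: t) d = bal t d := by
  obtain ⟨h1, h2, h3, h4⟩ := space_ne c hc
  conv_lhs => rw [bal]
  simp [h1, h2, h3, h4]

theorem bal_skipWS (cs : List Char) (d : Nat) : bal (aSkipWS cs) d = bal cs d := by
  induction cs with
  | nil => rfl
  | cons c t ih =>
    by_cases hc : PySem.Chars.isspace c = true
    · rw [aSkipWS, List.dropWhile_cons_of_pos hc, ← aSkipWS, ih, bal_cons_space c t d hc]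
    · rw [aSkipWS, List.dropWhile_cons_of_neg (by simpa using hc)]

theorem strip_append_spaces (x w : List Char) (h : ∀ c ∈ w, PySem.Chars.isspace c = true) :
    PySem.Chars.strip (x ++ w) = PySem.Chars.strip x := by
  have hw : List.dropWhile PySem.Chars.isspace w = [] :=
    List.dropWhile_eq_nil_iff.mpr h
  have hrev : ∀ (y : List Char), PySem.Chars.rstrip (y ++ w) = PySem.Chars.rstrip y := by
    intro y
    unfold PySem.Chars.rstrip
    rw [List.reverse_append, List.dropWhile_append,
      List.dropWhile_eq_nil_iff.mpr (fun x hx => h x (List.mem_reverse.mp hx))]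
    simp
  unfold PySem.Chars.strip PySem.Chars.lstrip
  rw [List.dropWhile_append]
  by_cases he : (List.dropWhile PySem.Chars.isspace x).isEmpty
  · simp only [he, if_true, hw]
    simp only [List.isEmpty_iff] at he
    rw [he]
  · simp only [he]
    exact hrev _

-- one-step reductions of grp on a leading token while inside a form
theorem grp_cons_lp (ts : List BTok) (d : Nat) (buf : List Char) :
    grp (.lp :: ts) true d buf = grp ts true (d + 1) (buf ++ ['(']) := by
  cases d <;> rfl

theorem grp_cons_str (s : List Char) (ts : List BTok) (d : Nat) (buf : List Char) :
    grp (.str s :: ts) true d buf = grp ts true d (buf ++ s) := by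
  cases d <;> rfl

theorem grp_cons_com (s : List Char) (ts : List BTok) (d : Nat) (buf : List Char) :
    grp (.com s :: ts) true d buf = grp ts true d (buf ++ s) := by
  cases d <;> rfl

theorem grp_cons_atom (s : List Char) (ts : List BTok) (d : Nat) (buf : List Char) :
    grp (.atom s :: ts) true d buf = grp ts true d (buf ++ s) := by
  cases d <;> rfl

theorem grp_cons_ws_pos (s : List Char) (ts : List BTok) (d : Nat) (buf : List Char) (hd : d ≠ 0) :
    grp (.ws s :: ts) true d buf = grp ts true d (buf ++ s) := by
  cases d with
  | zero => exact absurd rfl hd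
  | succ k => rfl

theorem grp_cons_rp_big (ts : List BTok) (d : Nat) (buf : List Char) (hd : 1 < d) :
    grp (.rp :: ts) true d buf = grp ts true (d - 1) (buf ++ [')']) := by
  obtain ⟨k, rfl⟩ : ∃ k, d = k + 2 := ⟨d - 2, by omega⟩
  rfl

theorem tokenize_cons_space (c : Char) (t : List Char) (hc : PySem.Chars.isspace c = true) :
    tokenize (c :: t) =
      .ws (c :: t.takeWhile PySem.Chars.isspace) :: tokenize (t.dropWhile PySem.Chars.isspace) := by
  rw [tokenize]; simp [hc]

theorem tokenize_cons_lp (t : List Char) : tokenize ('(' :: t) = .lp :: tokenize t := by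
  rw [tokenize]; simp [show PySem.Chars.isspace '(' = false by decide]

theorem tokenize_cons_rp (t : List Char) : tokenize (')' :: t) = .rp :: tokenize t := by
  rw [tokenize]; simp [show PySem.Chars.isspace ')' = false by decide]

theorem tokenize_cons_quote (t : List Char) :
    tokenize ('"' :: t) = .str ('"' :: (scanStr t false).1) :: tokenize (scanStr t false).2 := by
  rw [tokenize]; simp [show PySem.Chars.isspace '"' = false by decide]

theorem tokenize_cons_semi (t : List Char) :
    tokenize (';' :: t) =
      .com (';' :: t.takeWhile (· ≠ '\n')) :: tokenize (t.dropWhile (· ≠ '\n')) := by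
  rw [tokenize]; simp [show PySem.Chars.isspace ';' = false by decide]

theorem atomChar_facts (c : Char) (hc : isAtomChar c = true) :
    PySem.Chars.isspace c = false ∧ c ≠ '(' ∧ c ≠ ')' ∧ c ≠ '"' ∧ c ≠ ';' := by
  simp only [isAtomChar, Bool.and_eq_true, Bool.not_eq_true'] at hc
  exact ⟨hc.1.1.1.1, by simpa using hc.1.1.1.2, by simpa using hc.1.1.2, by simpa using hc.1.2,
    by simpa using hc.2⟩

theorem tokenize_cons_atom (c : Char) (t : List Char) (hc : isAtomChar c = true) :
    tokenize (c :: t) = .atom (c :: t.takeWhile isAtomChar) :: tokenize (t.dropWhile isAtomChar) := by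
  obtain ⟨h0, h1, h2, h3, h4⟩ := atomChar_facts c hc
  rw [tokenize]; simp [h0, h1, h2, h3, h4]

-- consuming one atom char and retokenizing is absorbing it into the buffer
theorem grp_atom_step (c : Char) (t : List Char) (d : Nat) (buf : List Char)
    (h : isAtomChar c = true) :
    grp (tokenize (c :: t)) true d buf = grp (tokenize t) true d (buf ++ [c]) := by
  rw [tokenize_cons_atom c t h, grp_cons_atom]
  cases ht : t with
  | nil => simp
  | cons c' t' =>
    by_cases hc' : isAtomChar c' = true
    · rw [List.takeWhile_cons_of_pos hc', List.dropWhile_cons_of_pos hc',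
        tokenize_cons_atom c' t' hc']
      simp [grp_cons_atom]
    · rw [List.takeWhile_cons_of_neg (by simpa using hc'),
        List.dropWhile_cons_of_neg (by simpa using hc')]

theorem grp_ws_step (c : Char) (t : List Char) (d : Nat) (buf : List Char)
    (h : PySem.Chars.isspace c = true) (hd : 0 < d) :
    grp (tokenize (c :: t)) true d buf = grp (tokenize t) true d (buf ++ [c]) := by
  rw [tokenize_cons_space c t h, grp_cons_ws_pos _ _ _ _ (by omega)]
  cases ht : t with
  | nil => simp
  | cons c' t' =>
    by_cases hc' : PySem.Chars.isspace c' = true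
    · have hzd : d ≠ 0 := by omega
      rw [List.takeWhile_cons_of_pos hc', List.dropWhile_cons_of_pos hc',
        tokenize_cons_space c' t' hc']
      simp [grp_cons_ws_pos _ _ _ _ hzd]
    · rw [List.takeWhile_cons_of_neg (by simpa using hc'),
        List.dropWhile_cons_of_neg (by simpa using hc')]

theorem grp_skipWS (cs : List Char) : grp (tokenize (aSkipWS cs)) false 0 [] = grp (tokenize cs) false 0 [] := by
  cases cs with
  | nil => rfl
  | cons c t =>
    by_cases hc : PySem.Chars.isspace c = true
    · rw [aSkipWS, List.dropWhile_cons_of_pos hc, tokenize_cons_space c t hc]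
      rw [show grp (.ws (c :: t.takeWhile PySem.Chars.isspace) ::
          tokenize (t.dropWhile PySem.Chars.isspace)) false 0 [] =
          grp (tokenize (t.dropWhile PySem.Chars.isspace)) false 0 [] from rfl]
    · rw [aSkipWS, List.dropWhile_cons_of_neg (by simpa using hc)]

theorem grp_false_eq_true_nil (ts : List BTok) : grp ts false 0 [] = grp ts true 0 [] := by
  cases ts with
  | nil => rfl
  | cons tok ts =>
    cases tok <;> rfl

-- one-step reductions of A's inner loop (not in string state)
theorem aInner_cons_quote (t : List Char) (d : Nat) :
    aInner ('"' :: t) d false false =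
      ('"' :: ((scanStr t false).1 ++ (aInner (scanStr t false).2 d false false).1),
       (aInner (scanStr t false).2 d false false).2) := by
  have h : aInner ('"' :: t) d false false =
      ('"' :: (aInner t d true false).1, (aInner t d true false).2) := by
    rw [aInner]; simp
  rw [h, aInner_string t d false]

theorem aInner_cons_semi (t : List Char) (d : Nat) :
    aInner (';' :: t) d false false =
      ((';' :: t.takeWhile (· ≠ '\n')) ++ (aInner (t.dropWhile (· ≠ '\n')) d false false).1,
       (aInner (t.dropWhile (· ≠ '\n')) d false false).2) := by
  rw [aInner]; simp

theorem aInner_cons_lp (t : List Char) (d : Nat) :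
    aInner ('(' :: t) d false false =
      ('(' :: (aInner t (d + 1) false false).1, (aInner t (d + 1) false false).2) := by
  rw [aInner]; simp

theorem aInner_cons_rp_one (t : List Char) :
    aInner (')' :: t) 1 false false =
      (')' :: t.takeWhile PySem.Chars.isspace, t.dropWhile PySem.Chars.isspace) := by
  rw [aInner]; simp

theorem aInner_cons_rp_big (t : List Char) (d : Nat) (hd : 1 < d) :
    aInner (')' :: t) d false false =
      (')' :: (aInner t (d - 1) false false).1, (aInner t (d - 1) false false).2) := by
  rw [aInner]; simp [show 0 < d by omega, show ¬(d - 1 = 0) by omega]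

theorem aInner_cons_space_zero (c : Char) (t : List Char) (hc : PySem.Chars.isspace c = true) :
    aInner (c :: t) 0 false false = ([], c :: t) := by
  obtain ⟨h1, h2, h3, h4⟩ := space_ne c hc
  rw [aInner]; simp [h1, h2, h3, h4, hc]

theorem aInner_cons_other (c : Char) (t : List Char) (d : Nat)
    (h1 : c ≠ '"') (h2 : c ≠ ';') (h3 : c ≠ '(') (h4 : c ≠ ')')
    (h5 : ¬(d = 0 ∧ PySem.Chars.isspace c = true)) :
    aInner (c :: t) d false false =
      (c :: (aInner t d false false).1, (aInner t d false false).2) := by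
  rw [aInner]; simp [h1, h2, h3, h4, h5]

theorem aInner_cons_rp_zero (t : List Char) :
    aInner (')' :: t) 0 false false = ([], ')' :: t) := by
  rw [aInner]; simp

theorem scanStr_split (t : List Char) (esc : Bool) :
    (scanStr t esc).1 ++ (scanStr t esc).2 = t := by
  induction t generalizing esc with
  | nil => simp [scanStr]
  | cons c t ih => simp only [scanStr]; split_ifs <;> simp [ih]

theorem aInner_split : ∀ (n : Nat) (cs : List Char), cs.length ≤ n → ∀ (d : Nat),
    (aInner cs d false false).1 ++ (aInner cs d false false).2 = cs := by
  intro n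
  induction n with
  | zero =>
    intro cs hlen d
    rw [List.length_eq_zero_iff.mp (Nat.le_zero.mp hlen)]
    rw [aInner]; simp
  | succ n ih =>
    intro cs hlen d
    cases cs with
    | nil => rw [aInner]; simp
    | cons c t =>
      simp only [List.length_cons, Nat.succ_le_succ_iff] at hlen
      by_cases hq : c = '"'
      · subst hq
        rw [aInner_cons_quote]
        have h1 := ih (scanStr t false).2 (le_trans (scanStr_rest_le t false) hlen) d
        have h2 := scanStr_split t false
        simp only [List.cons_append, List.append_assoc, h1, h2]
      · by_cases hsc : c = ';'
        · subst hsc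
          rw [aInner_cons_semi]
          have h1 := ih (t.dropWhile (· ≠ '\n')) (le_trans (List.length_dropWhile_le _ _) hlen) d
          simp only [List.cons_append, List.append_assoc, h1, List.takeWhile_append_dropWhile]
        · by_cases hl : c = '('
          · subst hl
            rw [aInner_cons_lp]
            have h1 := ih t hlen (d + 1)
            simp only [List.cons_append, h1]
          · by_cases hr : c = ')'
            · subst hr
              match d with
              | 0 => rw [aInner_cons_rp_zero]; simp
              | 1 => rw [aInner_cons_rp_one]; simp [List.takeWhile_append_dropWhile]
              | (k + 2) =>
                rw [aInner_cons_rp_big t (k + 2) (by omega)]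
                have h1 := ih t hlen (k + 1)
                simp only [List.cons_append]
                rw [show k + 2 - 1 = k + 1 from rfl, h1]
            · by_cases h5 : d = 0 ∧ PySem.Chars.isspace c = true
              · obtain ⟨rfl, hsp⟩ := h5
                rw [aInner_cons_space_zero c t hsp]; simp
              · rw [aInner_cons_other c t d hq hsc hl hr h5]
                have h1 := ih t hlen d
                simp only [List.cons_append, h1]

-- one-step reductions of bal
theorem bal_cons_quote (t : List Char) (d : Nat) :
    bal ('"' :: t) d = bal (scanStr t false).2 d := by
  rw [bal]; simp [scanStr_snd_eq_balString]

theorem bal_cons_semi (t : List Char) (d : Nat) :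
    bal (';' :: t) d = bal (t.dropWhile (· ≠ '\n')) d := by
  rw [bal]; simp

theorem bal_cons_lp (t : List Char) (d : Nat) : bal ('(' :: t) d = bal t (d + 1) := by
  rw [bal]; simp

theorem bal_cons_rp (t : List Char) (d : Nat) :
    bal (')' :: t) d = (decide (0 < d) && bal t (d - 1)) := by
  rw [bal]; simp

theorem bal_cons_other (c : Char) (t : List Char) (d : Nat)
    (h1 : c ≠ '"') (h2 : c ≠ ';') (h3 : c ≠ '(') (h4 : c ≠ ')') :
    bal (c :: t) d = bal t d := by
  rw [bal]; simp [h1, h2, h3, h4]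

theorem grp_cons_rp_one (ts : List BTok) (buf : List Char) :
    grp (.rp :: ts) true 1 buf = pushForm (buf ++ [')']) (grp ts false 0 []) := rfl

theorem grp_cons_ws_zero (s : List Char) (ts : List BTok) (buf : List Char) :
    grp (.ws s :: ts) true 0 buf = pushForm buf (grp ts false 0 []) := rfl

theorem pushForm_strip_congr (b1 b2 : List Char) (X : List (List Char))
    (h : PySem.Chars.strip b1 = PySem.Chars.strip b2) : pushForm b1 X = pushForm b2 X := by
  unfold pushForm; rw [h]

theorem form_nil (d : Nat) (buf : List Char) :
    grp (tokenize []) true d buf =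
      pushForm (buf ++ (aInner [] d false false).1)
        (grp (tokenize (aSkipWS (aInner [] d false false).2)) false 0 [])
    ∧ bal (aInner [] d false false).2 0 = true := by
  rw [show aInner [] d false false = ([], []) from by rw [aInner],
    show tokenize [] = [] from by rw [tokenize]]
  constructor
  · show pushForm buf [] = pushForm (buf ++ []) (grp (tokenize (aSkipWS [])) false 0 [])
    rw [show aSkipWS ([] : List Char) = [] from rfl,
      show tokenize [] = [] from by rw [tokenize], List.append_nil]
    rfl
  · rw [bal]

theorem dropWhile_head_false {p : Char → Bool} :
    ∀ (l : List Char) (c : Char) (t : List Char), l.dropWhile p = c :: t → p c = false := by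
  intro l
  induction l with
  | nil => intro c t h; simp at h
  | cons x l ih =>
    intro c t h
    by_cases hx : p x = true
    · rw [List.dropWhile_cons_of_pos hx] at h; exact ih c t h
    · rw [List.dropWhile_cons_of_neg hx] at h
      injection h with h1 h2
      subst h1
      simpa using hx

-- the main simulation: one form, token side vs character side
theorem form_lemma (n : Nat) : ∀ (cs : List Char), cs.length ≤ n → ∀ (d : Nat) (buf : List Char),
    bal cs d = true →
    grp (tokenize cs) true d buf =
      pushForm (buf ++ (aInner cs d false false).1)
        (grp (tokenize (aSkipWS (aInner cs d false false).2)) false 0 [])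
    ∧ bal (aInner cs d false false).2 0 = true := by
  induction n with
  | zero =>
    intro cs hlen d buf _
    rw [List.length_eq_zero_iff.mp (Nat.le_zero.mp hlen)]
    exact form_nil d buf
  | succ n ih =>
    intro cs hlen d buf hbal
    cases cs with
    | nil => exact form_nil d buf
    | cons c t =>
      simp only [List.length_cons, Nat.succ_le_succ_iff] at hlen
      by_cases hq : c = '"'
      · subst hq
        rw [bal_cons_quote] at hbal
        obtain ⟨ih1, ih2⟩ := ih (scanStr t false).2 (le_trans (scanStr_rest_le t false) hlen) d
          (buf ++ '"' :: (scanStr t false).1) hbal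
        simp only [aInner_cons_quote, tokenize_cons_quote, grp_cons_str]
        refine ⟨?_, ih2⟩
        rw [ih1]; congr 1; simp
      · by_cases hsc : c = ';'
        · subst hsc
          rw [bal_cons_semi] at hbal
          obtain ⟨ih1, ih2⟩ := ih (t.dropWhile (· ≠ '\n'))
            (le_trans (List.length_dropWhile_le _ _) hlen) d
            (buf ++ ';' :: t.takeWhile (· ≠ '\n')) hbal
          simp only [aInner_cons_semi, tokenize_cons_semi, grp_cons_com]
          refine ⟨?_, ih2⟩
          rw [ih1]; congr 1; simp
        · by_cases hl : c = '('
          · subst hl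
            rw [bal_cons_lp] at hbal
            obtain ⟨ih1, ih2⟩ := ih t hlen (d + 1) (buf ++ ['(']) hbal
            simp only [aInner_cons_lp, tokenize_cons_lp, grp_cons_lp]
            refine ⟨?_, ih2⟩
            rw [ih1]; congr 1; simp
          · by_cases hr : c = ')'
            · subst hr
              rw [bal_cons_rp] at hbal
              simp only [Bool.and_eq_true, decide_eq_true_eq] at hbal
              obtain ⟨hd, hbt⟩ := hbal
              match d, hd with
              | 1, _ =>
                simp only [aInner_cons_rp_one, tokenize_cons_rp, grp_cons_rp_one]
                constructor
                · rw [show aSkipWS (t.dropWhile PySem.Chars.isspace) =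
                      t.dropWhile PySem.Chars.isspace from List.dropWhile_idempotent _ _,
                    show t.dropWhile PySem.Chars.isspace = aSkipWS t from rfl, grp_skipWS]
                  refine pushForm_strip_congr _ _ _ ?_
                  rw [show buf ++ ')' :: t.takeWhile PySem.Chars.isspace =
                      (buf ++ [')']) ++ t.takeWhile PySem.Chars.isspace by simp]
                  exact (strip_append_spaces _ _ (fun x hx => List.mem_takeWhile_imp hx)).symm
                · rw [show t.dropWhile PySem.Chars.isspace = aSkipWS t from rfl, bal_skipWS]
                  exact hbt
              | (k + 2), _ =>
                have hbt' : bal t (k + 1) = true := hbt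
                obtain ⟨ih1, ih2⟩ := ih t hlen (k + 1) (buf ++ [')']) hbt'
                rw [tokenize_cons_rp, grp_cons_rp_big (tokenize t) (k + 2) buf (by omega),
                  aInner_cons_rp_big t (k + 2) (by omega)]
                simp only [show k + 2 - 1 = k + 1 from rfl]
                refine ⟨?_, ih2⟩
                rw [ih1]; congr 1; simp
            · by_cases hs : PySem.Chars.isspace c = true
              · cases d with
                | zero =>
                  simp only [aInner_cons_space_zero c t hs, tokenize_cons_space c t hs,
                    grp_cons_ws_zero]
                  refine ⟨?_, hbal⟩
                  rw [show aSkipWS (c :: t) = t.dropWhile PySem.Chars.isspace from by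
                    rw [aSkipWS, List.dropWhile_cons_of_pos hs]]
                  simp
                | succ k =>
                  rw [bal_cons_space c t _ hs] at hbal
                  obtain ⟨ih1, ih2⟩ := ih t hlen (k + 1) (buf ++ [c]) hbal
                  rw [grp_ws_step c t (k + 1) buf hs (by omega),
                    aInner_cons_other c t (k + 1) hq hsc hl hr (by simp)]
                  refine ⟨?_, ih2⟩
                  rw [ih1]; congr 1; simp
              · have hsf : PySem.Chars.isspace c = false := by simpa using hs
                have hac : isAtomChar c = true := by
                  simp [isAtomChar, hsf, hq, hsc, hl, hr]
                rw [bal_cons_other c t d hq hsc hl hr] at hbal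
                obtain ⟨ih1, ih2⟩ := ih t hlen d (buf ++ [c]) hbal
                rw [grp_atom_step c t d buf hac,
                  aInner_cons_other c t d hq hsc hl hr (by tauto)]
                refine ⟨?_, ih2⟩
                rw [ih1]; congr 1; simp

theorem aInner_progress (c : Char) (t : List Char)
    (hb : bal (c :: t) 0 = true) (hs : PySem.Chars.isspace c = false) :
    (aInner (c :: t) 0 false false).1 ≠ [] := by
  by_cases hq : c = '"'
  · subst hq; rw [aInner_cons_quote]; simp
  · by_cases hsc : c = ';'
    · subst hsc; rw [aInner_cons_semi]; simp
    · by_cases hl : c = '('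
      · subst hl; rw [aInner_cons_lp]; simp
      · by_cases hr : c = ')'
        · subst hr; rw [bal_cons_rp] at hb; simp at hb
        · rw [aInner_cons_other c t 0 hq hsc hl hr (by simp [hs])]; simp

theorem aOuter_succ (f : Nat) (rest : List Char) (acc : List (List Char)) :
    aOuter (f + 1) rest acc =
      if (aSkipWS rest).isEmpty then acc
      else
        aOuter f (aSkipWS (aInner (aSkipWS rest) 0 false false).2)
          (if (PySem.Chars.strip (aInner (aSkipWS rest) 0 false false).1).isEmpty then acc
           else acc ++ [PySem.Chars.strip (aInner (aSkipWS rest) 0 false false).1]) := rfl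

theorem outer_lemma (n : Nat) : ∀ (cs : List Char), cs.length ≤ n → ∀ (acc : List (List Char)) (f : Nat),
    bal cs 0 = true → cs.length < f →
    aOuter f cs acc = acc ++ grp (tokenize cs) false 0 [] := by
  induction n with
  | zero =>
    intro cs hlen acc f _ hf
    rw [List.length_eq_zero_iff.mp (Nat.le_zero.mp hlen)] at hf ⊢
    obtain ⟨f', rfl⟩ : ∃ f', f = f' + 1 := ⟨f - 1, by omega⟩
    rw [aOuter_succ]
    simp [aSkipWS, show tokenize [] = [] from by rw [tokenize],
      show grp ([] : List BTok) false 0 [] = [] from rfl]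
  | succ n ih =>
    intro cs hlen acc f hbal hf
    obtain ⟨f', rfl⟩ : ∃ f', f = f' + 1 := ⟨f - 1, by omega⟩
    rw [aOuter_succ]
    have hgs : grp (tokenize cs) false 0 [] = grp (tokenize (aSkipWS cs)) false 0 [] :=
      (grp_skipWS cs).symm
    by_cases hemp : (aSkipWS cs).isEmpty
    · rw [if_pos hemp, hgs, List.isEmpty_iff.mp hemp,
        show tokenize [] = [] from by rw [tokenize],
        show grp ([] : List BTok) false 0 [] = [] from rfl]
      simp
    · rw [if_neg hemp]
      obtain ⟨c, t, hct⟩ : ∃ c t, aSkipWS cs = c :: t := by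
        cases h : aSkipWS cs with
        | nil => rw [h] at hemp; simp at hemp
        | cons c t => exact ⟨c, t, rfl⟩
      have hski : (aSkipWS cs).length ≤ cs.length := List.length_dropWhile_le _ _
      have hbal1 : bal (aSkipWS cs) 0 = true := by rw [bal_skipWS]; exact hbal
      have hhd : PySem.Chars.isspace c = false :=
        dropWhile_head_false cs c t hct
      have hprog : (aInner (aSkipWS cs) 0 false false).1 ≠ [] := by
        rw [hct]; exact aInner_progress c t (by rw [← hct]; exact hbal1) hhd
      have hsplit := aInner_split (aSkipWS cs).length (aSkipWS cs) le_rfl 0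
      have hlt : (aInner (aSkipWS cs) 0 false false).2.length < (aSkipWS cs).length := by
        have h1 : (aInner (aSkipWS cs) 0 false false).1.length +
            (aInner (aSkipWS cs) 0 false false).2.length = (aSkipWS cs).length := by
          rw [← List.length_append, hsplit]
        have h2 : (aInner (aSkipWS cs) 0 false false).1.length ≠ 0 := by
          simpa [List.length_eq_zero_iff] using hprog
        omega
      obtain ⟨fl1, fl2⟩ := form_lemma (aSkipWS cs).length (aSkipWS cs) le_rfl 0 [] hbal1
      have hle : (aSkipWS (aInner (aSkipWS cs) 0 false false).2).length ≤
          (aInner (aSkipWS cs) 0 false false).2.length := List.length_dropWhile_le _ _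
      have hrec := ih (aSkipWS (aInner (aSkipWS cs) 0 false false).2)
        (by omega)
        (if (PySem.Chars.strip (aInner (aSkipWS cs) 0 false false).1).isEmpty then acc
         else acc ++ [PySem.Chars.strip (aInner (aSkipWS cs) 0 false false).1]) f'
        (by rw [bal_skipWS]; exact fl2)
        (by omega)
      rw [hrec, hgs]
      rw [show grp (tokenize (aSkipWS cs)) false 0 [] =
          pushForm (aInner (aSkipWS cs) 0 false false).1
            (grp (tokenize (aSkipWS (aInner (aSkipWS cs) 0 false false).2)) false 0 []) from by
        rw [grp_false_eq_true_nil, fl1]; simp]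
      simp only [pushForm]
      split_ifs <;> simp

theorem foldlBal_string (t : List Char) (d : Nat) (ok : Bool) (esc : Bool) :
    (t.foldl pvBalStep ((if esc then 2 else 1), d, ok)).2.2 =
      ((balString t esc).foldl pvBalStep (0, d, ok)).2.2 := by
  induction t generalizing esc with
  | nil => cases esc <;> simp [balString]
  | cons c t ih =>
    cases esc with
    | true => simpa [List.foldl_cons, pvBalStep, balString] using ih false
    | false =>
      by_cases hb : c = '\\'
      · simpa [List.foldl_cons, pvBalStep, balString, hb] using ih true
      · by_cases hq : c = '"'
        · simp [List.foldl_cons, pvBalStep, balString, hq]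
        · simpa [List.foldl_cons, pvBalStep, balString, hb, hq] using ih false

theorem foldlBal_comment (t : List Char) (d : Nat) (ok : Bool) :
    (t.foldl pvBalStep (3, d, ok)).2.2 =
      ((t.dropWhile (· ≠ '\n')).foldl pvBalStep (0, d, ok)).2.2 := by
  induction t with
  | nil => simp
  | cons c t ih =>
    by_cases hn : c = '\n'
    · subst hn
      rw [List.dropWhile_cons_of_neg (by simp)]
      simp [List.foldl_cons, pvBalStep]
    · rw [List.dropWhile_cons_of_pos (by simpa using hn)]
      simpa [List.foldl_cons, pvBalStep, hn] using ih

theorem foldlBal_main (n : Nat) : ∀ (cs : List Char), cs.length ≤ n → ∀ (d : Nat) (ok : Bool),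
    (cs.foldl pvBalStep (0, d, ok)).2.2 = (ok && bal cs d) := by
  induction n with
  | zero =>
    intro cs hlen d ok
    rw [List.length_eq_zero_iff.mp (Nat.le_zero.mp hlen)]
    rw [show bal [] d = true from by rw [bal]]
    simp
  | succ n ih =>
    intro cs hlen d ok
    cases cs with
    | nil => rw [show bal [] d = true from by rw [bal]]; simp
    | cons c t =>
      simp only [List.length_cons, Nat.succ_le_succ_iff] at hlen
      by_cases hq : c = '"'
      · subst hq
        rw [List.foldl_cons, show pvBalStep (0, d, ok) '"' = (1, d, ok) from by
            simp [pvBalStep],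
          show ((1 : Nat), d, ok) = ((if false then 2 else 1 : Nat), d, ok) from by simp,
          foldlBal_string t d ok false,
          ih (balString t false) (le_trans (balString_le t false) hlen) d ok,
          bal_cons_quote, scanStr_snd_eq_balString]
      · by_cases hsc : c = ';'
        · subst hsc
          rw [List.foldl_cons, show pvBalStep (0, d, ok) ';' = (3, d, ok) from by
              simp [pvBalStep],
            foldlBal_comment t d ok,
            ih (t.dropWhile (· ≠ '\n')) (le_trans (List.length_dropWhile_le _ _) hlen) d ok,
            bal_cons_semi]
        · by_cases hl : c = '('
          · subst hl
            rw [List.foldl_cons, show pvBalStep (0, d, ok) '(' = (0, d + 1, ok) from by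
                simp [pvBalStep],
              ih t hlen (d + 1) ok, bal_cons_lp]
          · by_cases hr : c = ')'
            · subst hr
              rw [List.foldl_cons, show pvBalStep (0, d, ok) ')' =
                  (0, d - 1, ok && decide (0 < d)) from by simp [pvBalStep],
                ih t hlen (d - 1) (ok && decide (0 < d)), bal_cons_rp, Bool.and_assoc]
            · rw [List.foldl_cons, show pvBalStep (0, d, ok) c = (0, d, ok) from by
                  simp [pvBalStep, hq, hsc, hl, hr],
                ih t hlen d ok, bal_cons_other c t d hq hsc hl hr]

theorem pre_eq_bal (cs : List Char) : (cs.foldl pvBalStep (0, 0, true)).2.2 = bal cs 0 := by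
  rw [foldlBal_main cs.length cs le_rfl 0 true, Bool.true_and]

-- ===== VERDICT (by name: the statement is the Claim_ definition above) =====
theorem split_top_level_forms_py_spec : Claim_equal_split_top_level_forms_py := by
  intro text _ hpre
  unfold Pre_split_top_level_forms_py at hpre
  rw [pre_eq_bal] at hpre
  unfold Spec_split_top_level_forms_py split_top_level_forms_py split_top_level_forms_py_alt
  rw [outer_lemma text.toList.length text.toList le_rfl [] (text.toList.length + 1) hpre (Nat.lt_succ_self _)]
  rfl
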